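-- pv_equiv track=rewrite | github.com/Bobcatsoap/jy-server | cell/RoomType6PassiveFindCards.py | is_s_z
-- ===== SOURCE A (Python) =====
-- def is_s_z(cards):
--     if len(cards) < 5:
--         return False
--     # 排序
--     cards.sort()
--     # 不能包含大小王和 2
--     if cards[len(cards) - 1] >= 15:
--         return False
--     for card in cards:
--         if cards.count(card) != 1:
--             return False
--     for index in range(0, len(cards) - 1):
--         if not cards[index] + 1 == cards[index + 1]:
--             return False
--     return True
-- ===== SOURCE B (Python) =====
-- def is_s_z(cards):
--     # single adjacent-pair scan: +1 steps imply distinctness, so no count pass needed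
--     cards.sort()
--     if len(cards) < 5 or cards[-1] >= 15:
--         return False
--     return all(b - a == 1 for a, b in zip(cards, cards[1:]))
-- ===== Notes on version B (the rewrite author's own statement) =====
-- stated objective: simpler
-- what changed: Replaced A's per-element cards.count duplicate pass plus a separate index loop with a single adjacent-pair zip scan over the sorted list (consecutiveness already forces distinctness).
import Mathlib
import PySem

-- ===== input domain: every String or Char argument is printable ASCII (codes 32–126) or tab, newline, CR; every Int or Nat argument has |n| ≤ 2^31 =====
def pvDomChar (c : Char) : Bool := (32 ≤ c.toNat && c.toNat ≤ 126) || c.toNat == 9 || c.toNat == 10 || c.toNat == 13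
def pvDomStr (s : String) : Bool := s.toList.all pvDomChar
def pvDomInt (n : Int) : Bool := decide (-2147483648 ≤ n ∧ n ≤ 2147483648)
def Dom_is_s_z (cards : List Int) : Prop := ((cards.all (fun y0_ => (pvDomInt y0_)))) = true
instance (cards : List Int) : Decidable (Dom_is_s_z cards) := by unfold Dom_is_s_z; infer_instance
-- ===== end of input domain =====

-- B replaces A's per-element count pass and separate index loop by one adjacent-pair scan (simpler).
-- Both A and B sort `cards` in place in Python; the equivalence proved here is about the return value.

-- ===== PORT A =====
def is_s_z (cards : List Int) : Bool :=
  if cards.length < 5 then false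
  else
    let s := PySem.List.sorted cards (fun x => x) false
    match PySem.List.pyGet? s ((s.length : Int) - 1) with
    | none => false   -- unreachable (length ≥ 5): guard for totality only
    | some last =>
      if 15 ≤ last then false
      else if ¬ (s.all fun card => PySem.List.count s card == 1) then false
      else (PySem.List.pyRange 0 ((s.length : Int) - 1) 1).all fun index =>
        match PySem.List.pyGet? s index, PySem.List.pyGet? s (index + 1) with
        | some a, some b => a + 1 == b
        | _, _ => false   -- unreachable (index in range): guard for totality only

-- ===== PORT B =====
def is_s_z_alt (cards : List Int) : Bool :=
  let s := PySem.List.sorted cards (fun x => x) false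
  if cards.length < 5 then false
  else
    match PySem.List.pyGet? s (-1) with
    | none => false   -- unreachable (nonempty): guard for totality only
    | some last =>
      if 15 ≤ last then false
      else (s.zip s.tail).all fun p => p.2 - p.1 == 1

-- ===== PRECONDITION & SPEC =====
def Spec_is_s_z (cards : List Int) (out : Bool) : Prop := out = is_s_z_alt cards
instance (cards : List Int) (out : Bool) : Decidable (Spec_is_s_z cards out) := by unfold Spec_is_s_z; infer_instance

-- ===== CLAIM (what is proved, stated in full; the proofs are below) =====
def Claim_equal_is_s_z : Prop := ∀ (cards : List Int), Dom_is_s_z cards → Spec_is_s_z cards (is_s_z cards)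

-- ===== LEMMAS AND PROOFS =====

-- B's zip-scan succeeds exactly on +1-chains
theorem zip_tail_all_iff_chain (s : List Int) :
    ((s.zip s.tail).all fun p => p.2 - p.1 == 1) = true ↔ List.IsChain (fun a b => a + 1 = b) s := by
  match s with
  | [] => simp
  | [a] => simp
  | a :: b :: t =>
    have ih := zip_tail_all_iff_chain (b :: t)
    rw [List.tail_cons] at ih
    rw [List.tail_cons, List.zip_cons_cons, List.all_cons, Bool.and_eq_true, ih,
      List.isChain_cons_cons, beq_iff_eq]
    constructor
    · rintro ⟨h1, h2⟩; exact ⟨by omega, h2⟩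
    · rintro ⟨h1, h2⟩; exact ⟨by omega, h2⟩

-- A's index loop succeeds exactly on +1-chains
theorem range_all_iff_chain (s : List Int) :
    ((PySem.List.pyRange 0 ((s.length : Int) - 1) 1).all fun index =>
        match PySem.List.pyGet? s index, PySem.List.pyGet? s (index + 1) with
        | some a, some b => a + 1 == b
        | _, _ => false) = true ↔ List.IsChain (fun a b => a + 1 = b) s := by
  rw [PySem.List.pyRange_one, List.all_eq_true, List.isChain_iff_getElem]
  constructor
  · intro h i hi
    have hmem : ((0 : Int) + (i : Int)) ∈
        (List.range (((s.length : Int) - 1 - 0).toNat)).map (fun k : Nat => (0 : Int) + (k : Int)) :=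
      List.mem_map.mpr ⟨i, List.mem_range.mpr (by omega), rfl⟩
    have := h _ hmem
    rw [show (0 : Int) + (i : Int) = ((i : Nat) : Int) by simp,
        show ((i : Nat) : Int) + 1 = (((i + 1 : Nat)) : Int) by push_cast; ring,
        PySem.List.pyGet?_natCast, PySem.List.pyGet?_natCast,
        List.getElem?_eq_getElem (show i < s.length by omega),
        List.getElem?_eq_getElem hi] at this
    simpa using this
  · intro h x hx
    obtain ⟨k, hk, rfl⟩ := List.mem_map.mp hx
    have hk' := List.mem_range.mp hk
    rw [show (0 : Int) + (k : Int) = ((k : Nat) : Int) by simp,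
        show ((k : Nat) : Int) + 1 = (((k + 1 : Nat)) : Int) by push_cast; ring,
        PySem.List.pyGet?_natCast, PySem.List.pyGet?_natCast,
        List.getElem?_eq_getElem (show k < s.length by omega),
        List.getElem?_eq_getElem (show k + 1 < s.length by omega)]
    simpa using h k (by omega)

-- a +1-chain is strictly increasing hence has no duplicates
theorem chain_nodup {s : List Int} (h : List.IsChain (fun a b => a + 1 = b) s) : s.Nodup := by
  have hlt : List.IsChain (fun a b : Int => a < b) s := h.imp_of_mem_imp (by intro a b _ _ hab; omega)
  exact (List.isChain_iff_pairwise.mp hlt).nodup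

-- a +1-chain makes A's count pass succeed
theorem chain_count_all {s : List Int} (h : List.IsChain (fun a b => a + 1 = b) s) :
    (s.all fun card => PySem.List.count s card == 1) = true := by
  rw [List.all_eq_true]
  intro x hx
  rw [PySem.List.count_eq]
  have h1 : List.count x s <= 1 := List.nodup_iff_count_le_one.mp (chain_nodup h) x
  have h2 : 0 < List.count x s := List.count_pos_iff.mpr hx
  simp; omega

theorem is_s_z_eq (cards : List Int) : is_s_z cards = is_s_z_alt cards := by
  unfold is_s_z is_s_z_alt
  by_cases h5 : cards.length < 5
  · simp [h5]
  · simp only [h5, if_false]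
    set s := PySem.List.sorted cards (fun x => x) false with hs
    have hlen : s.length = cards.length := PySem.List.length_sorted ..
    have hne : s ≠ [] := by
      intro h; rw [h] at hlen; simp at hlen; omega
    have hcast : ((s.length : Int) - 1) = ((s.length - 1 : Nat) : Int) := by
      have : 1 ≤ s.length := List.length_pos_iff.mpr hne
      omega
    have hget : PySem.List.pyGet? s ((s.length : Int) - 1) = s.getLast? := by
      rw [hcast, PySem.List.pyGet?_natCast, List.getLast?_eq_getElem?]
    rw [hget, PySem.List.pyGet?_neg_one]
    rcases hlast : s.getLast? with _ | last
    · rfl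
    · by_cases h15 : (15 : Int) ≤ last
      · simp [h15]
      · simp only [h15, if_false]
        by_cases hch : List.IsChain (fun a b : Int => a + 1 = b) s
        · rw [chain_count_all hch, (zip_tail_all_iff_chain s).mpr hch,
            (range_all_iff_chain s).mpr hch]
          simp
        · have hz : ((s.zip s.tail).all fun p => p.2 - p.1 == 1) = false :=
            Bool.eq_false_iff.mpr (fun hb => hch ((zip_tail_all_iff_chain s).mp hb))
          have hr : ((PySem.List.pyRange 0 ((s.length : Int) - 1) 1).all fun index =>
              match PySem.List.pyGet? s index, PySem.List.pyGet? s (index + 1) with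
              | some a, some b => a + 1 == b
              | _, _ => false) = false :=
            Bool.eq_false_iff.mpr (fun hb => hch ((range_all_iff_chain s).mp hb))
          rw [hz, hr]
          split <;> rfl

-- ===== VERDICT (by name: the statement is the Claim_ definition above) =====
theorem is_s_z_spec : Claim_equal_is_s_z := by
  intro cards _
  unfold Spec_is_s_z
  exact is_s_z_eq cards
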